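-- pv_equiv track=rewrite | github.com/1r0nw1ll/quantum-arithmetic-research | qa_fibonacci_tougher_null.py | enumerate_coprime_ratios
-- ===== SOURCE A (Python) =====
-- from math import gcd, log
--
-- MAX_PQ = 10
--
-- def enumerate_coprime_ratios(max_pq=MAX_PQ):
--     """All coprime ratios p:q with p > q, both <= max_pq."""
--     ratios = []
--     for q in range(1, max_pq + 1):
--         for p in range(q + 1, max_pq + 1):
--             if gcd(p, q) != 1:
--                 continue
--             ratios.append((p, q))
--     return ratios
-- ===== SOURCE B (Python) =====
-- MAX_PQ = 10
--
-- def enumerate_coprime_ratios(max_pq=MAX_PQ):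
--     """All coprime ratios p:q with p > q, both <= max_pq.
--
--     Sieve instead of per-pair gcd: for each candidate common divisor d,
--     mark every pair it divides in a per-q row via bulk slice assignment, then emit
--     the unmarked pairs in the same (q, p) traversal order."""
--     rows = [bytearray(max_pq + 1) for _ in range(max_pq + 1)]
--     for d in range(2, max_pq + 1):
--         for q in range(d, max_pq + 1, d):
--             rows[q][q + d::d] = b'\x01' * ((max_pq - q) // d)
--     return [(p, q)
--             for q in range(1, max_pq + 1)
--             for p in range(q + 1, max_pq + 1)
--             if not rows[q][p]]
-- ===== Notes on version B (the rewrite author's own statement) =====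
-- stated objective: alternative
-- what changed: Replaces the per-pair gcd test with a divisor sieve: for each candidate common divisor it bulk-marks all pairs sharing that factor in per-q byte rows, then emits the unmarked pairs in the same (q,p) order.
import Mathlib
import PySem

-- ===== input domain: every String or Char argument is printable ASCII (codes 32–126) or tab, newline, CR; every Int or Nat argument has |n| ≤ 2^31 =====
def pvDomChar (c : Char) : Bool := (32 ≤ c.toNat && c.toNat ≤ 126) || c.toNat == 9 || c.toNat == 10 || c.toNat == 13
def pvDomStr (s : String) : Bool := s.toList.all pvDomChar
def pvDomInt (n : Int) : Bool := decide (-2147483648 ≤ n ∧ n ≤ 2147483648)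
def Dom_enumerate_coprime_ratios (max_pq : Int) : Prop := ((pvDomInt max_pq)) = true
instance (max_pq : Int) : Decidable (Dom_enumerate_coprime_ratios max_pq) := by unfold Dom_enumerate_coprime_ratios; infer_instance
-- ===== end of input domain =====

-- B replaces the per-pair gcd test with a divisor sieve that bulk-marks non-coprime pairs
-- in per-q rows, read back in the same traversal order (objective: alternative algorithm).

-- ===== PORT A =====
def enumerate_coprime_ratios (max_pq : Int) : List (Int × Int) :=
  (PySem.List.pyRange 1 (max_pq + 1) 1).foldl (fun ratios q =>
    (PySem.List.pyRange (q + 1) (max_pq + 1) 1).foldl (fun ratios p =>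
      if Int.gcd p q ≠ 1 then ratios else ratios ++ [(p, q)]) ratios) []

-- ===== PORT B =====
-- hand port of the slice assignment `row[q + d::d] = b'\x01' * ((max_pq - q) // d)`: the
-- assigned length equals the slice's length, so it sets exactly the indices
-- q + d, q + 2d, … < len(row) to 1 — exact here since 0 ≤ q + d and 0 < d at the call site.
def markRow (row : List Bool) (start d : Int) : List Bool :=
  row.mapIdx (fun i b => if start ≤ (i : Int) ∧ d ∣ ((i : Int) - start) then true else b)

def badRows (max_pq : Int) : List (List Bool) :=
  (PySem.List.pyRange 2 (max_pq + 1) 1).foldl (fun rows d =>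
    (PySem.List.pyRange d (max_pq + 1) d).foldl (fun rows q =>
      rows.modify q.toNat (fun row => markRow row (q + d) d)) rows)
    ((PySem.List.pyRange 0 (max_pq + 1) 1).map (fun _ => List.replicate (max_pq + 1).toNat false))

def enumerate_coprime_ratios_alt (max_pq : Int) : List (Int × Int) :=
  let rows := badRows max_pq
  (PySem.List.pyRange 1 (max_pq + 1) 1).foldl (fun acc q =>
    (PySem.List.pyRange (q + 1) (max_pq + 1) 1).foldl (fun acc p =>
      if PySem.List.pyGetD (PySem.List.pyGetD rows q []) p false then acc
      else acc ++ [(p, q)]) acc) []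

-- ===== PRECONDITION & SPEC =====
def Spec_enumerate_coprime_ratios (max_pq : Int) (out : List (Int × Int)) : Prop := out = enumerate_coprime_ratios_alt max_pq
instance (max_pq : Int) (out : List (Int × Int)) : Decidable (Spec_enumerate_coprime_ratios max_pq out) := by unfold Spec_enumerate_coprime_ratios; infer_instance

-- ===== CLAIM (what is proved, stated in full; the proofs are below) =====
def Claim_equal_enumerate_coprime_ratios : Prop := ∀ (max_pq : Int), Dom_enumerate_coprime_ratios max_pq → Spec_enumerate_coprime_ratios max_pq (enumerate_coprime_ratios max_pq)

-- ===== LEMMAS AND PROOFS =====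

/-- The table entry (q, p), read exactly as B's port reads it. -/
def pvMark (rows : List (List Bool)) (q p : Int) : Bool :=
  PySem.List.pyGetD (PySem.List.pyGetD rows q []) p false

/-- Shape invariant: a square table of side N. -/
def pvSquare (N : Nat) (rows : List (List Bool)) : Prop :=
  rows.length = N ∧ ∀ r ∈ rows, r.length = N

theorem pv_foldl_inv {γ β : Type} (I : γ → Prop) (g : γ → β → γ) :
    ∀ (l : List β) (s : γ), I s → (∀ s' y, I s' → y ∈ l → I (g s' y)) → I (l.foldl g s) := by
  intro l
  induction l with
  | nil => intro s h _; simpa using h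
  | cons y l ih =>
    intro s hI hg
    exact ih (g s y) (hg s y hI (by simp)) (fun s' z h1 h2 => hg s' z h1 (by simp [h2]))

/-- A fold whose steps only ever set a monitored flag: the flag is set at the end
iff it was set at the start or some step of the fold sets it. -/
theorem pv_foldl_mark {γ β : Type} (F : γ → Bool) (I : γ → Prop) (P : β → Prop)
    (g : γ → β → γ) :
    ∀ (l : List β) (s : γ), I s →
      (∀ s' y, I s' → y ∈ l → (F (g s' y) = true ↔ F s' = true ∨ P y)) →
      (∀ s' y, I s' → y ∈ l → I (g s' y)) →
      (F (l.foldl g s) = true ↔ F s = true ∨ ∃ y ∈ l, P y) := by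
  intro l
  induction l with
  | nil => intro s _ _ _; simp
  | cons y l ih =>
    intro s hI hg hgI
    have hIy : I (g s y) := hgI s y hI (by simp)
    rw [List.foldl_cons,
      ih (g s y) hIy (fun s' z h1 h2 => hg s' z h1 (by simp [h2]))
        (fun s' z h1 h2 => hgI s' z h1 (by simp [h2])),
      hg s y hI (by simp)]
    constructor
    · rintro ((h | h) | ⟨z, hz, hP⟩)
      · exact Or.inl h
      · exact Or.inr ⟨y, by simp, h⟩
      · exact Or.inr ⟨z, by simp [hz], hP⟩
    · rintro (h | ⟨z, hz, hP⟩)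
      · exact Or.inl (Or.inl h)
      · rcases List.mem_cons.mp hz with h' | h'
        · exact Or.inl (Or.inr (h' ▸ hP))
        · exact Or.inr ⟨z, h', hP⟩

theorem pvMark_eq {N : Nat} (rows : List (List Bool)) (q p : Int)
    (h : pvSquare N rows) (hq0 : 0 ≤ q) (hqN : q.toNat < N) (hp0 : 0 ≤ p) (hpN : p.toNat < N) :
    pvMark rows q p = (rows[q.toNat]!)[p.toNat]! := by
  obtain ⟨hlen, hall⟩ := h
  have hqlt : q.toNat < rows.length := by omega
  have hplt : p.toNat < (rows[q.toNat]).length := by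
    rw [hall _ (List.getElem_mem hqlt)]; exact hpN
  unfold pvMark
  rw [PySem.List.pyGetD_eq_getElem rows [] hq0 (by omega),
    PySem.List.pyGetD_eq_getElem _ false hp0 (by omega),
    getElem!_pos rows q.toNat hqlt, getElem!_pos _ p.toNat hplt]

theorem pvSquare_modify {N : Nat} (rows : List (List Bool)) (j : Nat) (s d : Int)
    (h : pvSquare N rows) :
    pvSquare N (rows.modify j (fun row => markRow row s d)) := by
  obtain ⟨hlen, hall⟩ := h
  refine ⟨by simp [hlen], ?_⟩
  intro r hr
  rw [List.mem_iff_getElem] at hr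
  obtain ⟨i, hi, hri⟩ := hr
  rw [List.getElem_modify] at hri
  have hi' : i < rows.length := by simpa using hi
  split at hri
  · rw [← hri]
    simp [markRow, hall _ (List.getElem_mem hi')]
  · rw [← hri]
    exact hall _ (List.getElem_mem hi')

theorem pvMark_modify {N : Nat} (rows : List (List Bool)) (q p q' d : Int)
    (h : pvSquare N rows) (hq0 : 0 ≤ q) (hqN : q.toNat < N) (hp0 : 0 ≤ p) (hpN : p.toNat < N)
    (hq'0 : 0 ≤ q') :
    (pvMark (rows.modify q'.toNat (fun row => markRow row (q' + d) d)) q p = true ↔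
      pvMark rows q p = true ∨ (q' = q ∧ q' + d ≤ p ∧ d ∣ (p - (q' + d)))) := by
  obtain ⟨hlen, hall⟩ := h
  have hqlt : q.toNat < rows.length := by omega
  have hplt : p.toNat < (rows[q.toNat]).length := by
    rw [hall _ (List.getElem_mem hqlt)]; exact hpN
  have hsq' : pvSquare N (rows.modify q'.toNat (fun row => markRow row (q' + d) d)) :=
    pvSquare_modify rows q'.toNat (q' + d) d ⟨hlen, hall⟩
  rw [pvMark_eq (N := N) _ q p hsq' hq0 hqN hp0 hpN,
    pvMark_eq (N := N) rows q p ⟨hlen, hall⟩ hq0 hqN hp0 hpN]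
  have hqlt' : q.toNat < (rows.modify q'.toNat (fun row => markRow row (q' + d) d)).length := by
    simpa using hqlt
  rw [getElem!_pos _ q.toNat hqlt', getElem!_pos rows q.toNat hqlt, List.getElem_modify]
  by_cases hqq : q' = q
  · subst hqq
    rw [if_pos rfl]
    have hplt2 : p.toNat < (markRow (rows[q'.toNat]) (q' + d) d).length := by
      simpa [markRow] using hplt
    rw [getElem!_pos _ p.toNat hplt2, getElem!_pos _ p.toNat hplt]
    unfold markRow
    rw [List.getElem_mapIdx]
    have hcast : ((p.toNat : Int)) = p := Int.toNat_of_nonneg hp0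
    rw [hcast]
    split_ifs with hc
    · simp [hc]
    · simp [hc]
  · have : q'.toNat ≠ q.toNat := fun hc => hqq (by omega)
    rw [if_neg this]
    simp [hqq]

theorem mark_badRows (n q p : Int) (hq0 : 0 ≤ q) (hqn : q < n + 1) (hp0 : 0 ≤ p)
    (hpn : p < n + 1) :
    pvMark (badRows n) q p = true ↔
      ∃ d, 2 ≤ d ∧ d ∣ q ∧ d ∣ p ∧ d ≤ q ∧ q + d ≤ p := by
  have hqN : q.toNat < (n + 1).toNat := by omega
  have hpN : p.toNat < (n + 1).toNat := by omega
  unfold badRows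
  have hI0 : pvSquare (n + 1).toNat
      ((PySem.List.pyRange 0 (n + 1) 1).map (fun _ => List.replicate (n + 1).toNat false)) := by
    constructor
    · simp [PySem.List.length_pyRange_one]
    · intro r hr
      rw [List.mem_map] at hr
      obtain ⟨_, _, hr⟩ := hr
      simp [← hr]
  rw [pv_foldl_mark (fun rows => pvMark rows q p) (pvSquare (n + 1).toNat)
      (fun d => ∃ q' ∈ PySem.List.pyRange d (n + 1) d,
        (q' = q ∧ q' + d ≤ p ∧ d ∣ (p - (q' + d)))) _ _ _ hI0
      (fun s d hIs hd => by
        have hd' := (PySem.List.mem_pyRange_one).mp hd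
        exact pv_foldl_mark (fun rows => pvMark rows q p) (pvSquare (n + 1).toNat)
          (fun q' => (q' = q ∧ q' + d ≤ p ∧ d ∣ (p - (q' + d)))) _ _ _ hIs
          (fun s' q' hIs' hq' => by
            have hq'm := (PySem.List.mem_pyRange_iff_of_pos (by omega) q').mp hq'
            exact pvMark_modify s' q p q' d hIs' hq0 hqN hp0 hpN (by omega))
          (fun s' q' hIs' _ => pvSquare_modify s' q'.toNat (q' + d) d hIs'))
      (fun s d hIs hd =>
        pv_foldl_inv (pvSquare (n + 1).toNat) _ _ s hIs
          (fun s' q' hIs' _ => pvSquare_modify s' q'.toNat (q' + d) d hIs'))]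
  have h0 : pvMark
      ((PySem.List.pyRange 0 (n + 1) 1).map (fun _ => List.replicate (n + 1).toNat false)) q p
      = false := by
    rw [pvMark_eq (N := (n + 1).toNat) _ q p hI0 hq0 hqN hp0 hpN]
    have h1 : q.toNat <
        ((PySem.List.pyRange 0 (n + 1) 1).map
          (fun _ => List.replicate (n + 1).toNat false)).length := by
      simp [PySem.List.length_pyRange_one]; omega
    rw [getElem!_pos _ q.toNat h1, List.getElem_map]
    rw [getElem!_pos _ p.toNat (by simpa using hpN), List.getElem_replicate]
  rw [h0]
  simp only [Bool.false_eq_true, false_or]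
  constructor
  · rintro ⟨d, hd, q', hq', hqq, hqdp, hdvd⟩
    have hd' := (PySem.List.mem_pyRange_one).mp hd
    have hq'm := (PySem.List.mem_pyRange_iff_of_pos (by omega) q').mp hq'
    subst hqq
    have hdvq : d ∣ q' := by
      have h := hq'm.2.2
      have he : q' = (q' - d) + d := by ring
      rw [he]; exact dvd_add h (dvd_refl d)
    have hdvp : d ∣ p := by
      have he : p = (p - (q' + d)) + (q' + d) := by ring
      rw [he]; exact dvd_add hdvd (dvd_add hdvq (dvd_refl d))
    exact ⟨d, hd'.1, hdvq, hdvp, hq'm.1, hqdp⟩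
  · rintro ⟨d, hd2, hdq, hdp, hdleq, hqdp⟩
    refine ⟨d, (PySem.List.mem_pyRange_one).mpr ⟨hd2, by omega⟩, q, ?_, rfl, hqdp, ?_⟩
    · rw [PySem.List.mem_pyRange_iff_of_pos (by omega)]
      exact ⟨hdleq, hqn, dvd_sub hdq (dvd_refl d)⟩
    · exact dvd_sub hdp (dvd_add hdq (dvd_refl d))

/-- On the traversed pairs (1 ≤ q < p ≤ n), the sieve table agrees with the gcd test. -/
theorem badRows_iff_gcd (n p q : Int) (hq1 : 1 ≤ q) (hqp : q < p) (hpn : p < n + 1) :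
    pvMark (badRows n) q p = true ↔ Int.gcd p q ≠ 1 := by
  rw [mark_badRows n q p (by omega) (by omega) (by omega) hpn]
  constructor
  · rintro ⟨d, hd2, hdq, hdp, _, _⟩
    intro hgcd
    have h1 : d.natAbs ∣ p.natAbs := Int.natAbs_dvd_natAbs.mpr hdp
    have h2 : d.natAbs ∣ q.natAbs := Int.natAbs_dvd_natAbs.mpr hdq
    have hdg : d.natAbs ∣ Int.gcd p q := by
      rw [Int.gcd_def]; exact Nat.dvd_gcd h1 h2
    rw [hgcd] at hdg
    have := Nat.dvd_one.mp hdg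
    omega
  · intro hgcd
    set g : Int := (Int.gcd p q : Int) with hg
    have hgq : g ∣ q := Int.gcd_dvd_right p q
    have hgp : g ∣ p := Int.gcd_dvd_left p q
    have hgpos : 0 < g := by
      have h0 : Int.gcd p q ≠ 0 := by
        intro h0
        have := Int.gcd_eq_zero_iff.mp h0
        omega
      have := Nat.pos_of_ne_zero h0
      rw [hg]; exact_mod_cast this
    have hg2 : 2 ≤ g := by
      rcases lt_or_ge g 2 with h | h
      · exfalso
        have h1 : g = 1 := by omega
        rw [hg] at h1
        exact hgcd (by exact_mod_cast h1)
      · exact h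
    have hgleq : g ≤ q := Int.le_of_dvd (by omega) hgq
    have hgppq : g ∣ p - q := dvd_sub hgp hgq
    have hpq : g ≤ p - q := Int.le_of_dvd (by omega) hgppq
    exact ⟨g, hg2, hgq, hgp, hgleq, by omega⟩

-- ===== VERDICT (by name: the statement is the Claim_ definition above) =====
theorem enumerate_coprime_ratios_spec : Claim_equal_enumerate_coprime_ratios := by
  intro n _
  unfold Spec_enumerate_coprime_ratios enumerate_coprime_ratios enumerate_coprime_ratios_alt
  refine PySem.List.foldl_congr_mem' _ _ _ _ ?_
  intro q hq acc
  refine PySem.List.foldl_congr_mem' _ _ _ _ ?_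
  intro p hp acc'
  rw [PySem.List.mem_pyRange_one] at hq hp
  have hmem := badRows_iff_gcd n p q (by omega) (by omega) (by omega)
  show (if Int.gcd p q ≠ 1 then acc' else acc' ++ [(p, q)]) =
    (if pvMark (badRows n) q p then acc' else acc' ++ [(p, q)])
  by_cases h : pvMark (badRows n) q p = true
  · rw [if_pos (hmem.mp h), if_pos h]
  · have h1 : Int.gcd p q = 1 := by
      by_contra hc
      exact h (hmem.mpr hc)
    rw [if_neg (by simp [h1]), if_neg (by simpa using h)]
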